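-- pv_equiv track=rewrite | github.com/QuinuxJ/PythonStuff | CodeWars/InterviewPracticies.py | problema1
-- ===== SOURCE A (Python) =====
-- def problema1(arr):
--     threeNm = []
--     for i in arr:
--         num = i
--         for j in arr:
--             if j > num:
--                 num = j
--                 threeNm.append(num)
--             else: continue
--         return threeNm
-- ===== SOURCE B (Python) =====
-- def problema1(arr):
--     if not arr:
--         return None
--     pm = [arr[0]]
--     m = arr[0]
--     for x in arr[1:]:
--         m = max(m, x)
--         pm.append(m)
--     return [b for a, b in zip(pm, pm[1:]) if b > a]
-- ===== Notes on version B (the rewrite author's own statement) =====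
-- stated objective: alternative
-- what changed: B replaces A's single in-place accumulator scan (appending each new strict maximum inside the loop) with a two-pass decomposition: first build the prefix-maximum table, then select the entries that strictly exceed their predecessor via a zip of adjacent pairs; empty input returns None explicitly instead of A's fall-through.
import Mathlib
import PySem

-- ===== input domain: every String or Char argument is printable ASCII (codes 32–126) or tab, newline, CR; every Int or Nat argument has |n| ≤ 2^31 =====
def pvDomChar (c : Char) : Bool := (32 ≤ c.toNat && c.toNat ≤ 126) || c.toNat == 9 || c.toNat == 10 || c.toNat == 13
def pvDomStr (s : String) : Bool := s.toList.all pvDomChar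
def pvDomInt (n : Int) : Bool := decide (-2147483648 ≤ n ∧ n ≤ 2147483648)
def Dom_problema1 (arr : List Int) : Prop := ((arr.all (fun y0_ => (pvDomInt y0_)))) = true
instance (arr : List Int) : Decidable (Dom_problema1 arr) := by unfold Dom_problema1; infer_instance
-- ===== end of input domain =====

-- B builds the prefix-maximum table first and then filters the strict adjacent increases (two passes),
-- instead of A's single accumulator scan that appends each new strict maximum in place; same cost.


-- ===== PORT A =====
-- A: num starts at the first element; one inner scan over arr appends each strictly larger
-- running maximum; the function returns inside the first outer iteration (None on empty arr).
def problema1 (arr : List Int) : Option (List Int) :=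
  match arr with
  | [] => none
  | i :: _ =>
    some ((arr.foldl (fun (st : Int × List Int) j =>
      if j > st.1 then (j, st.2 ++ [j]) else st) (i, [])).2)

-- ===== PORT B =====
-- B: build the prefix-maximum table pm, then keep the entries strictly above their predecessor.
def problema1_alt (arr : List Int) : Option (List Int) :=
  match arr with
  | [] => none
  | x :: xs =>
    let pm := (xs.foldl (fun (st : Int × List Int) y =>
      (max st.1 y, st.2 ++ [max st.1 y])) (x, [x])).2
    some (((pm.zip (pm.drop 1)).filter (fun p => p.2 > p.1)).map Prod.snd)

-- ===== PRECONDITION & SPEC =====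
def Spec_problema1 (arr : List Int) (out : Option (List Int)) : Prop := out = problema1_alt arr
instance (arr : List Int) (out : Option (List Int)) : Decidable (Spec_problema1 arr out) := by unfold Spec_problema1; infer_instance

-- ===== CLAIM (what is proved, stated in full; the proofs are below) =====
def Claim_equal_problema1 : Prop := ∀ (arr : List Int), Dom_problema1 arr → Spec_problema1 arr (problema1 arr)

-- ===== LEMMAS AND PROOFS =====

-- the list of new strict running maxima of l starting from current maximum m
def pvRec (m : Int) : List Int → List Int
  | [] => []
  | y :: t => if y > m then y :: pvRec y t else pvRec m t

-- the prefix-maximum tail of l starting from m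
def pvPms (m : Int) : List Int → List Int
  | [] => []
  | y :: t => max m y :: pvPms (max m y) t

theorem pvFoldA (l : List Int) : ∀ (m : Int) (acc : List Int),
    (l.foldl (fun (st : Int × List Int) j =>
      if j > st.1 then (j, st.2 ++ [j]) else st) (m, acc)).2 = acc ++ pvRec m l := by
  induction l with
  | nil => intro m acc; simp [pvRec]
  | cons y t ih =>
    intro m acc
    by_cases h : y > m
    · simp [List.foldl, h, ih, pvRec]
    · simp [List.foldl, h, ih, pvRec]

theorem pvFoldB (l : List Int) : ∀ (m : Int) (acc : List Int),
    (l.foldl (fun (st : Int × List Int) y =>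
      (max st.1 y, st.2 ++ [max st.1 y])) (m, acc)).2 = acc ++ pvPms m l := by
  induction l with
  | nil => intro m acc; simp [pvPms]
  | cons y t ih =>
    intro m acc
    simp [List.foldl, ih, pvPms]

-- selecting the strict adjacent increases of the prefix-maximum table yields exactly the records
theorem pvZipFilter (l : List Int) : ∀ (m : Int),
    (((m :: pvPms m l).zip (pvPms m l)).filter (fun p => p.2 > p.1)).map Prod.snd
      = pvRec m l := by
  induction l with
  | nil => intro m; simp [pvPms, pvRec]
  | cons y t ih =>
    intro m
    by_cases h : y > m
    · have hm : max m y = y := max_eq_right (le_of_lt h)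
      simp [pvPms, pvRec, hm, h, ih]
    · have hm : max m y = m := max_eq_left (le_of_not_gt h)
      simp [pvPms, pvRec, hm, h, ih]

-- ===== VERDICT (by name: the statement is the Claim_ definition above) =====
theorem problema1_spec : Claim_equal_problema1 := by
  intro arr _
  unfold Spec_problema1 problema1 problema1_alt
  match arr with
  | [] => rfl
  | x :: xs =>
    simp only
    have hA : (((x :: xs).foldl (fun (st : Int × List Int) j =>
        if j > st.1 then (j, st.2 ++ [j]) else st) (x, [])).2) = pvRec x xs := by
      simp [List.foldl, pvFoldA]
    have hB : ((xs.foldl (fun (st : Int × List Int) y =>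
        (max st.1 y, st.2 ++ [max st.1 y])) (x, [x])).2) = x :: pvPms x xs := by
      simpa using pvFoldB xs x [x]
    rw [hA, hB]
    simp only [List.drop_one, List.tail_cons]
    rw [pvZipFilter]
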